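-- pv_equiv track=rewrite | github.com/Sumanta01/Python_DSA | HackerRank Cpu Problem.py | getTotalExecutionTime
-- ===== SOURCE A (Python) =====
-- def getTotalExecutionTime(n, logs):
--     stack = []
--     result = [0] * n
--
--     prev_time = 0
--
--     for log in logs:
--         parts = log.split(":")
--         function_id, action, timestamp = int(parts[0]), parts[1], int(parts[2])
--
--         if action == "start":
--             if stack:
--                 result[stack[-1]] += timestamp - prev_time
--             stack.append(function_id)
--             prev_time = timestamp
--         else:
--             result[stack.pop()] += timestamp - prev_time + 1
--             prev_time = timestamp + 1
--
--     return result
-- ===== SOURCE B (Python) =====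
-- def getTotalExecutionTime(n, logs):
--     result = [0] * n
--     frames = []  # (function_id, start_time, accumulated child span)
--
--     for log in logs:
--         parts = log.split(":")
--         function_id, action, timestamp = int(parts[0]), parts[1], int(parts[2])
--
--         if action == "start":
--             frames.append((function_id, timestamp, 0))
--         else:
--             fid, start, child = frames.pop()
--             span = timestamp - start + 1
--             result[fid] += span - child
--             if frames:
--                 top_id, top_start, top_child = frames[-1]
--                 frames[-1] = (top_id, top_start, top_child + span)
--
--     return result
-- ===== Notes on version B (the rewrite author's own statement) =====
-- stated objective: alternative
-- what changed: Replaced A's global prev_time cursor that incrementally charges elapsed time to the current top of an id-stack by a stack of frames (id, start_time, child_span) that charge each function exactly once at its end event (span minus accumulated child span); Pre_ excludes log sequences with a start event that is never closed, where the time of a still-running function is unspecified and A's partial cursor credit and B's credit-only-at-end are both defensible.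
-- outside the precondition, e.g. on getTotalExecutionTime(1, ['0:start:0', '0:start:2']): A returns [2], B returns [0]
import Mathlib
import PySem

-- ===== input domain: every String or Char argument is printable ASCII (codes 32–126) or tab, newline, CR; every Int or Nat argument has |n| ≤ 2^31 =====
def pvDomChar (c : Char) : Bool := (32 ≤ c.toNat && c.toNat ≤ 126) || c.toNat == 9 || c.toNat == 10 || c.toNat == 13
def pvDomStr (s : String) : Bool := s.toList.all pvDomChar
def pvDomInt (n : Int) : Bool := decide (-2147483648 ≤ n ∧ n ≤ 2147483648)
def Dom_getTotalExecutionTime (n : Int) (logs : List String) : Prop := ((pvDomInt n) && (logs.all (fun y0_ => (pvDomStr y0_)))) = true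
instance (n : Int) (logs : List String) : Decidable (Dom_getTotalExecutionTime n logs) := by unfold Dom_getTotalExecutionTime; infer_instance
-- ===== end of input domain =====

-- B replaces A's global prev_time cursor (charging elapsed time to the current stack top) by a
-- stack of frames (id, start, child_span) that charge each function once at its end event.

-- shared parsing of one log line: parts = log.split(":"); int(parts[0]), parts[1], int(parts[2])
-- (none = the log line on which the Python raises: too few parts or int() ValueError)
def pvParse (log : String) : Option (Int × String × Int) :=
  match PySem.Str.split? log ":" with
  | some (p0 :: p1 :: p2 :: _) =>
    match PySem.Int.ofStr? p0, PySem.Int.ofStr? p2 with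
    | some fid, some ts => some (fid, p1, ts)
    | _, _ => none
  | _ => none

-- result[i] += v  (Python negative-index wraparound; out-of-range = IndexError, outside Pre_, no-op here)
def pvAddAt (r : List Int) (i v : Int) : List Int :=
  PySem.List.pySetD r i (PySem.List.pyGetD r i 0 + v)

-- ===== PORT A =====
def stepA (st : List Int × List Int × Int) (log : String) : List Int × List Int × Int :=
  match pvParse log with
  | none => st
  | some (fid, action, ts) =>
    if action == "start" then
      match st.1 with
      | top :: _ => (fid :: st.1, pvAddAt st.2.1 top (ts - st.2.2), ts)
      | [] => (fid :: st.1, st.2.1, ts)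
    else
      match st.1 with
      | top :: rest => (rest, pvAddAt st.2.1 top (ts - st.2.2 + 1), ts + 1)
      | [] => st

def getTotalExecutionTime (n : Int) (logs : List String) : List Int :=
  (logs.foldl stepA ([], PySem.List.pyRepeat [0] n, 0)).2.1

-- ===== PORT B =====
def stepB (st : List (Int × Int × Int) × List Int) (log : String) :
    List (Int × Int × Int) × List Int :=
  match pvParse log with
  | none => st
  | some (fid, action, ts) =>
    if action == "start" then
      ((fid, ts, 0) :: st.1, st.2)
    else
      match st.1 with
      | (id0, s, c) :: rest =>
        (match rest with
         | (i2, s2, c2) :: rr => (i2, s2, c2 + (ts - s + 1)) :: rr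
         | [] => [],
         pvAddAt st.2 id0 ((ts - s + 1) - c))
      | [] => st

def getTotalExecutionTime_alt (n : Int) (logs : List String) : List Int :=
  (logs.foldl stepB ([], PySem.List.pyRepeat [0] n)).2

-- ===== PRECONDITION & SPEC =====
def pvIsStart (log : String) : Bool :=
  match pvParse log with
  | some (_, a, _) => a == "start"
  | none => false

-- Pre_ = the logs on which A returns normally minus one defensible corner: it excludes log
-- sequences containing a start event that is never closed by a matching end, on which the
-- time of a still-running function is unspecified and A's partial cursor credit and B's
-- credit-only-at-end are both defensible.
def pvLogOk (n : Int) (l : String) : Bool :=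
  match pvParse l with
  | some (fid, a, _) => !(a == "start") || (decide (-n ≤ fid) && decide (fid < n))
  | none => false

def Pre_getTotalExecutionTime (n : Int) (logs : List String) : Prop :=
  (∀ l ∈ logs, pvLogOk n l = true)
  ∧ (∀ k < logs.length, pvIsStart (logs.getD k "") = false →
       (logs.take k).countP (fun l => !pvIsStart l) < (logs.take k).countP pvIsStart)
  ∧ logs.countP (fun l => !pvIsStart l) = logs.countP pvIsStart

instance (n : Int) (logs : List String) : Decidable (Pre_getTotalExecutionTime n logs) := by
  unfold Pre_getTotalExecutionTime; infer_instance

def pvWitness_getTotalExecutionTime : Int × List String :=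
  (2, ["0:start:0", "1:start:2", "1:end:5", "0:end:6"])

def Spec_getTotalExecutionTime (n : Int) (logs : List String) (out : List Int) : Prop :=
  out = getTotalExecutionTime_alt n logs
instance (n : Int) (logs : List String) (out : List Int) :
    Decidable (Spec_getTotalExecutionTime n logs out) := by
  unfold Spec_getTotalExecutionTime; infer_instance

-- ===== CLAIM (what is proved, stated in full; the proofs are below) =====
def Claim_equal_getTotalExecutionTime : Prop :=
  ∀ (n : Int) (logs : List String), Dom_getTotalExecutionTime n logs →
    Pre_getTotalExecutionTime n logs →
    Spec_getTotalExecutionTime n logs (getTotalExecutionTime n logs)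

-- ===== LEMMAS AND PROOFS =====

-- pending exclusive time A has already credited to still-open frames (top first; the
-- boundary of the top frame is A's prev_time, of each lower frame the start of the one above)
def pend : List (Int × Int × Int) → Int → List Int → List Int
  | [], _, r => r
  | (i, s, c) :: fs, bnd, r => pend fs s (pvAddAt r i (bnd - s - c))

theorem pyIdx?_lt {n : Nat} {i : Int} {k : Nat} (h : PySem.List.pyIdx? n i = some k) :
    k < n := by
  unfold PySem.List.pyIdx? at h
  split_ifs at h <;> simp_all <;> omega

theorem length_pvAddAt (r : List Int) (i v : Int) : (pvAddAt r i v).length = r.length := by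
  unfold pvAddAt
  exact PySem.List.length_pySetD r i _

theorem pvAddAt_eq_some {r : List Int} {i : Int} {k : Nat}
    (h : PySem.List.pyIdx? r.length i = some k) (v : Int) :
    pvAddAt r i v = r.set k (r.getD k 0 + v) := by
  have hk := pyIdx?_lt h
  unfold pvAddAt PySem.List.pySetD PySem.List.pySet? PySem.List.pyGetD PySem.List.pyGet?
  rw [h]
  simp [List.getElem?_eq_getElem hk]

theorem pvAddAt_eq_none {r : List Int} {i : Int}
    (h : PySem.List.pyIdx? r.length i = none) (v : Int) :
    pvAddAt r i v = r := by
  unfold pvAddAt PySem.List.pySetD PySem.List.pySet?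
  rw [h]
  rfl

theorem pvAddAt_zero (r : List Int) (i : Int) : pvAddAt r i 0 = r := by
  cases h : PySem.List.pyIdx? r.length i with
  | none => exact pvAddAt_eq_none h 0
  | some k =>
    rw [pvAddAt_eq_some h 0, List.getD_eq_getElem r 0 (pyIdx?_lt h), add_zero,
      List.set_getElem_self]

theorem pvAddAt_addAt_same (r : List Int) (i a b : Int) :
    pvAddAt (pvAddAt r i a) i b = pvAddAt r i (a + b) := by
  cases h : PySem.List.pyIdx? r.length i with
  | none =>
    rw [pvAddAt_eq_none h a, pvAddAt_eq_none h (a + b), pvAddAt_eq_none h b]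
  | some k =>
    have hk := pyIdx?_lt h
    have h2 : PySem.List.pyIdx? (pvAddAt r i a).length i = some k := by
      rw [length_pvAddAt]; exact h
    rw [pvAddAt_eq_some h2 b, pvAddAt_eq_some h a, pvAddAt_eq_some h (a + b)]
    have hk' : k < (r.set k (r.getD k 0 + a)).length := by simpa using hk
    rw [List.getD_eq_getElem _ 0 hk', List.getElem_set_self, List.set_set,
      List.getD_eq_getElem r 0 hk, add_assoc]

theorem pvAddAt_comm (r : List Int) (i j a b : Int) :
    pvAddAt (pvAddAt r i a) j b = pvAddAt (pvAddAt r j b) i a := by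
  cases hi : PySem.List.pyIdx? r.length i with
  | none =>
    rw [pvAddAt_eq_none hi a, pvAddAt_eq_none (by rwa [length_pvAddAt]) a]
  | some k =>
    cases hj : PySem.List.pyIdx? r.length j with
    | none =>
      rw [pvAddAt_eq_none hj b, pvAddAt_eq_none (by rwa [length_pvAddAt]) b]
    | some m =>
      have hk := pyIdx?_lt hi
      have hm := pyIdx?_lt hj
      have hi' : PySem.List.pyIdx? (pvAddAt r j b).length i = some k := by
        rw [length_pvAddAt]; exact hi
      have hj' : PySem.List.pyIdx? (pvAddAt r i a).length j = some m := by
        rw [length_pvAddAt]; exact hj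
      rw [pvAddAt_eq_some hj' b, pvAddAt_eq_some hi a,
        pvAddAt_eq_some hi' a, pvAddAt_eq_some hj b]
      by_cases hkm : k = m
      · subst hkm
        have h1 : k < (r.set k (r.getD k 0 + a)).length := by simpa using hk
        have h2 : k < (r.set k (r.getD k 0 + b)).length := by simpa using hk
        rw [List.getD_eq_getElem _ 0 h1, List.getD_eq_getElem _ 0 h2,
          List.getElem_set_self, List.getElem_set_self, List.set_set, List.set_set,
          List.getD_eq_getElem r 0 hk]
        ring_nf
      · have h1 : m < (r.set k (r.getD k 0 + a)).length := by simpa using hm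
        have h2 : k < (r.set m (r.getD m 0 + b)).length := by simpa using hk
        rw [List.getD_eq_getElem _ 0 h1, List.getD_eq_getElem _ 0 h2,
          List.getElem_set_ne hkm, List.getElem_set_ne (Ne.symm hkm)]
        simp only [List.getD_eq_getElem r 0 hm, List.getD_eq_getElem r 0 hk]
        exact List.set_comm _ _ hkm

theorem pend_addAt (fs : List (Int × Int × Int)) (bnd : Int) (r : List Int) (i a : Int) :
    pend fs bnd (pvAddAt r i a) = pvAddAt (pend fs bnd r) i a := by
  induction fs generalizing bnd r with
  | nil => rfl
  | cons f fs ih =>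
    obtain ⟨fi, fs', fc⟩ := f
    simp only [pend]
    rw [pvAddAt_comm, ih]

-- one start step: crediting (bnd' - bnd) to the open top frame moves the top boundary to bnd'
theorem pend_shift (fs : List (Int × Int × Int)) (i s c bnd bnd' : Int) (r : List Int) :
    pvAddAt (pend ((i, s, c) :: fs) bnd r) i (bnd' - bnd)
      = pend ((i, s, c) :: fs) bnd' r := by
  simp only [pend]
  rw [← pend_addAt, pvAddAt_addAt_same]
  have h : bnd - s - c + (bnd' - bnd) = bnd' - s - c := by ring
  rw [h]

theorem sim (logs : List String) : ∀ (frames : List (Int × Int × Int)) (prev : Int) (rB : List Int),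
    ∃ p', logs.foldl stepA (frames.map (·.1), pend frames prev rB, prev)
      = ((logs.foldl stepB (frames, rB)).1.map (·.1),
         pend (logs.foldl stepB (frames, rB)).1 p' (logs.foldl stepB (frames, rB)).2, p') := by
  induction logs with
  | nil => intro frames prev rB; exact ⟨prev, rfl⟩
  | cons l rest ih =>
    intro frames prev rB
    simp only [List.foldl_cons]
    cases hp : pvParse l with
    | none =>
      simp only [stepA, stepB, hp]
      exact ih frames prev rB
    | some x =>
      obtain ⟨fid, action, ts⟩ := x
      by_cases ha : (action == "start") = true
      · -- start event
        cases frames with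
        | nil =>
          simp only [stepA, stepB, hp, ha, if_pos, List.map_nil, pend]
          simpa [pend, pvAddAt_zero] using ih [(fid, ts, 0)] ts rB
        | cons f fs =>
          obtain ⟨i1, s1, c1⟩ := f
          simp only [stepA, stepB, hp, ha, if_pos, List.map_cons]
          have h1 : pvAddAt (pend ((i1, s1, c1) :: fs) prev rB) i1 (ts - prev)
              = pend ((fid, ts, 0) :: (i1, s1, c1) :: fs) ts rB := by
            rw [pend_shift]
            simp [pend, pvAddAt_zero]
          rw [h1]
          exact ih ((fid, ts, 0) :: (i1, s1, c1) :: fs) ts rB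
      · -- end event
        cases frames with
        | nil =>
          simp only [stepA, stepB, hp, ha, List.map_nil]
          exact ih [] prev rB
        | cons f fs =>
          obtain ⟨i1, s1, c1⟩ := f
          have key : pvAddAt (pend ((i1, s1, c1) :: fs) prev rB) i1 (ts - prev + 1)
              = pend (match fs with
                      | (i2, s2, c2) :: rr => (i2, s2, c2 + (ts - s1 + 1)) :: rr
                      | [] => []) (ts + 1) (pvAddAt rB i1 ((ts - s1 + 1) - c1)) := by
            have h2 : pvAddAt (pend ((i1, s1, c1) :: fs) prev rB) i1 (ts - prev + 1)
                = pend fs s1 (pvAddAt rB i1 ((ts - s1 + 1) - c1)) := by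
              simp only [pend]
              rw [← pend_addAt, pvAddAt_addAt_same]
              have h : prev - s1 - c1 + (ts - prev + 1) = ts - s1 + 1 - c1 := by ring
              rw [h]
            rw [h2]
            cases fs with
            | nil => rfl
            | cons g gs =>
              obtain ⟨i2, s2, c2⟩ := g
              simp only [pend]
              congr 1
              ring_nf
          simp only [stepA, stepB, hp, ha, List.map_cons]
          rw [key]
          cases fs with
          | nil => exact ih _ (ts + 1) _
          | cons g gs =>
            obtain ⟨i2, s2, c2⟩ := g
            exact ih ((i2, s2, c2 + (ts - s1 + 1)) :: gs) (ts + 1) _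

theorem framesLen (logs : List String) : ∀ (frames : List (Int × Int × Int)) (rB : List Int),
    (∀ l ∈ logs, (pvParse l).isSome) →
    (∀ k < logs.length, pvIsStart (logs.getD k "") = false →
       (logs.take k).countP (fun l => !pvIsStart l) < (logs.take k).countP pvIsStart + frames.length) →
    ((logs.foldl stepB (frames, rB)).1).length + logs.countP (fun l => !pvIsStart l)
      = frames.length + logs.countP pvIsStart := by
  induction logs with
  | nil => intro frames rB _ _; simp
  | cons l rest ih =>
    intro frames rB hall hpre
    have hl : (pvParse l).isSome := hall l List.mem_cons_self
    cases hp : pvParse l with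
    | none => rw [hp] at hl; simp at hl
    | some x =>
      obtain ⟨fid, a, ts⟩ := x
      have hstart : pvIsStart l = (a == "start") := by simp [pvIsStart, hp]
      have hall' : ∀ l' ∈ rest, (pvParse l').isSome :=
        fun l' h => hall l' (List.mem_cons_of_mem l h)
      simp only [List.foldl_cons, stepB, hp]
      by_cases ha : (a == "start") = true
      · simp only [ha, if_pos]
        have hpre' : ∀ k < rest.length, pvIsStart (rest.getD k "") = false →
            (rest.take k).countP (fun l => !pvIsStart l)
              < (rest.take k).countP pvIsStart + ((fid, ts, 0) :: frames).length := by
          intro k hk hs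
          have := hpre (k + 1) (by simpa using hk) (by simpa using hs)
          simp [List.take_succ_cons, hstart, ha] at this
          simp only [List.length_cons]
          omega
        have := ih ((fid, ts, 0) :: frames) rB hall' hpre'
        simp [hstart, ha] at this ⊢
        omega
      · have h0 := hpre 0 (by simp) (by simpa [hstart] using ha)
        simp only [List.take_zero, List.countP_nil] at h0
        cases frames with
        | nil => simp at h0
        | cons f fs =>
          obtain ⟨i1, s1, c1⟩ := f
          simp only [ha, if_neg, Bool.false_eq_true, not_false_iff]
          have hpre' : ∀ k < rest.length, pvIsStart (rest.getD k "") = false →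
              (rest.take k).countP (fun l => !pvIsStart l)
                < (rest.take k).countP pvIsStart
                  + (match fs with
                     | (i2, s2, c2) :: rr => (i2, s2, c2 + (ts - s1 + 1)) :: rr
                     | [] => ([] : List (Int × Int × Int))).length := by
            intro k hk hs
            have := hpre (k + 1) (by simpa using hk) (by simpa using hs)
            simp [List.take_succ_cons, hstart, ha] at this
            have hlen : (match fs with
                     | (i2, s2, c2) :: rr => (i2, s2, c2 + (ts - s1 + 1)) :: rr
                     | [] => ([] : List (Int × Int × Int))).length = fs.length := by
              cases fs with
              | nil => rfl
              | cons g gs => obtain ⟨i2, s2, c2⟩ := g; rfl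
            rw [hlen]
            omega
          have := ih _ (pvAddAt rB i1 ((ts - s1 + 1) - c1)) hall' hpre'
          have hlen : (match fs with
                   | (i2, s2, c2) :: rr => (i2, s2, c2 + (ts - s1 + 1)) :: rr
                   | [] => ([] : List (Int × Int × Int))).length = fs.length := by
            cases fs with
            | nil => rfl
            | cons g gs => obtain ⟨i2, s2, c2⟩ := g; rfl
          rw [hlen] at this
          simp [hstart, ha] at this ⊢
          omega

-- ===== VERDICT (by name: the statement is the Claim_ definition above) =====
theorem getTotalExecutionTime_spec : Claim_equal_getTotalExecutionTime := by
  intro n logs _hdom hpre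
  obtain ⟨hok, hpref, hbal⟩ := hpre
  unfold Spec_getTotalExecutionTime getTotalExecutionTime getTotalExecutionTime_alt
  have hparse : ∀ l ∈ logs, (pvParse l).isSome := by
    intro l hl
    have h := hok l hl
    unfold pvLogOk at h
    cases hp : pvParse l with
    | none => rw [hp] at h; simp at h
    | some x => simp
  have hframes := framesLen logs [] (PySem.List.pyRepeat [0] n) hparse
    (by intro k hk hs; simpa using hpref k hk hs)
  have hF : (logs.foldl stepB ([], PySem.List.pyRepeat [0] n)).1 = [] := by
    apply List.length_eq_zero_iff.mp
    simp only [List.length_nil] at hframes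
    omega
  obtain ⟨p', hsim⟩ := sim logs [] 0 (PySem.List.pyRepeat [0] n)
  have h0 : pend [] (0 : Int) (PySem.List.pyRepeat [0] n) = PySem.List.pyRepeat [0] n := rfl
  rw [h0] at hsim
  have hmapnil : (([] : List (Int × Int × Int)).map (·.1)) = ([] : List Int) := rfl
  rw [hmapnil] at hsim
  rw [hsim, hF]
  rfl
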